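-- pv_equiv track=rewrite | github.com/davemcg/human_variation_landscape | scripts/calculate_VL_stats.py | exon_processor
-- ===== SOURCE A (Python) =====
-- def exon_processor(exon_coords, strand):
-- 	# takes in list of list of exon coordinates [['chr1','100','200'],['chr1','300','600'],...]
-- 	# and processes to remove chr and make numeric
-- 	# and also adjusts end position by 3bp
-- 	# finally, it calculates the offsets and and shifts the exon coords
-- 	# so the above coords would now be [[100,200],[200,500],...]
--
-- 	# remove the chromosome from exon coords for calculations
-- 	exon_coords = [x[1:3] for x in exon_coords]
-- 	# convert to integer and ensure they are sorted
-- 	exon_coords = sorted([[int(pos) for pos in x] for x in exon_coords])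
-- 	# shift stop positions by 3 to include stop codon (which CDS doesn't not include)
-- 	if strand == '+':
-- 		exon_coords[-1][1] += 3
-- 	if strand == '-':
-- 		exon_coords[0][0] -= 3
--
-- 	# prep for offset calcs by inserting dummy values at beginning
-- 	exon_coords.insert(0,[1,1])
-- 	# calculate offsets for each exon coordinate set
-- 	offsets = [0]
-- 	for i in range(1,len(exon_coords)):
-- 		the_offset = exon_coords[i][0] - exon_coords[i-1][1]
-- 		offsets.append(offsets[i-1]+the_offset)
-- 	offsets.pop(0); exon_coords.pop(0) # remove dummy values
--
-- 	# calculate new exon coords from 1 to len(transcript) continuously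
-- 	# will later use the offsets calculated to re-calce the actual genomic positions
-- 	shifted_exon_coords = [[x[1][0]-offsets[x[0]],x[1][1]-offsets[x[0]]] for x in enumerate(exon_coords)]
-- 	return(shifted_exon_coords, offsets)
-- ===== SOURCE B (Python) =====
-- def exon_processor(exon_coords, strand):
-- 	# same parse/sort/strand-shift prelude as A, then ONE fused pass that keeps a
-- 	# running cumulative offset instead of A's dummy-sentinel + two separate passes
-- 	exon_coords = [x[1:3] for x in exon_coords]
-- 	exon_coords = sorted([[int(pos) for pos in x] for x in exon_coords])
-- 	if strand == '+':
-- 		exon_coords[-1][1] += 3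
-- 	if strand == '-':
-- 		exon_coords[0][0] -= 3
--
-- 	shifted, offsets = [], []
-- 	cum, prev_end = 0, 1
-- 	for start, end in exon_coords:
-- 		cum += start - prev_end
-- 		offsets.append(cum)
-- 		shifted.append([start - cum, end - cum])
-- 		prev_end = end
-- 	return (shifted, offsets)
-- ===== Notes on version B (the rewrite author's own statement) =====
-- stated objective: simpler
-- what changed: Replaces A's [1,1] dummy-sentinel insert/pop and its two separate passes (an index-driven offsets loop plus an enumerate comprehension) with a single fused pass that carries a running cumulative offset and previous end, appending offset and shifted coords together.
import Mathlib
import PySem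

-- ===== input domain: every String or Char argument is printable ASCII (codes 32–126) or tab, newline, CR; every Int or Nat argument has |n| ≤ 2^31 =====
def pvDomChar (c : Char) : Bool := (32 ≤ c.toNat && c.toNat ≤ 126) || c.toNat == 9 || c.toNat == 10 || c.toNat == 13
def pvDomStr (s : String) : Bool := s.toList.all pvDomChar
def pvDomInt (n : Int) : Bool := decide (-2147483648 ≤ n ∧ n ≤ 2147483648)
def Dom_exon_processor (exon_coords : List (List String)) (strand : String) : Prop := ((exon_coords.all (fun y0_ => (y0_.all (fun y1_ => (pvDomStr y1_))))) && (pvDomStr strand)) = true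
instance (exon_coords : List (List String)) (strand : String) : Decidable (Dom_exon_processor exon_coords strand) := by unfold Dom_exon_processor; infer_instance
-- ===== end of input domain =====

-- B keeps A's parse/sort/strand-shift prelude but replaces A's dummy-sentinel insert/pop
-- and its two separate index-driven passes by one fused accumulator pass (objective: simpler).
-- Neither implementation mutates its argument observably in Python (the list is rebound first).

-- ===== PORT A =====
-- shared prelude helpers: both Python sources open with the *identical* parse/sort/shift lines
def epG0 (r : List Int) : Int := PySem.List.pyGetD r 0 0   -- r[0] (in-range under Pre_)
def epG1 (r : List Int) : Int := PySem.List.pyGetD r 1 0   -- r[1] (in-range under Pre_)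

-- `exon_coords[-1][1] += 3` (Python raises IndexError on []; such inputs are outside Pre_)
def epShiftLast : List (List Int) → List (List Int)
  | [] => []
  | [r] => [PySem.List.pySetD r 1 (PySem.List.pyGetD r 1 0 + 3)]
  | r :: t => r :: epShiftLast t

-- the common prelude: `[x[1:3] for x]`, `sorted([[int(pos) …]])`, then the strand shifts
-- (int(pos) raises ValueError on a non-numeric string — outside Pre_; port uses .getD 0 there)
def epPrep (exon_coords : List (List String)) (strand : String) : List (List Int) :=
  let ec1 := exon_coords.map (fun x => PySem.List.slice x (some 1) (some 3))
  let ec2 := PySem.List.sorted (ec1.map (fun x => x.map (fun p => (PySem.Int.ofStr? p).getD 0))) (fun x => x) false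
  let ec3 := if strand = "+" then epShiftLast ec2 else ec2
  if strand = "-" then
    match ec3 with
    | [] => []      -- Python raises IndexError here (`exon_coords[0][0]`); outside Pre_
    | r :: t => PySem.List.pySetD r 0 (PySem.List.pyGetD r 0 0 - 3) :: t
  else ec3

def exon_processor (exon_coords : List (List String)) (strand : String) : List (List Int) × List Int :=
  let ec := epPrep exon_coords strand
  -- exon_coords.insert(0,[1,1])
  let ecD := PySem.List.insert ec 0 [1, 1]
  -- offsets = [0]; for i in range(1,len(exon_coords)): offsets.append(offsets[i-1]+the_offset)
  let offsets0 := (PySem.List.pyRange 1 (ecD.length : Int) 1).foldl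
    (fun offs i => offs ++ [PySem.List.pyGetD offs (i - 1) 0 +
        (epG0 (PySem.List.pyGetD ecD i []) - epG1 (PySem.List.pyGetD ecD (i - 1) []))]) [0]
  -- offsets.pop(0); exon_coords.pop(0)   (both lists are nonempty by construction, pop(0) = tail)
  let offsets := offsets0.tail
  let ecT := ecD.tail
  -- [[x[1][0]-offsets[x[0]], x[1][1]-offsets[x[0]]] for x in enumerate(exon_coords)]
  let shifted := (PySem.List.enumerate ecT 0).map (fun x =>
      [epG0 x.2 - PySem.List.pyGetD offsets x.1 0, epG1 x.2 - PySem.List.pyGetD offsets x.1 0])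
  (shifted, offsets)

-- ===== PORT B =====
def exon_processor_alt (exon_coords : List (List String)) (strand : String) : List (List Int) × List Int :=
  let ec := epPrep exon_coords strand
  -- one pass: state (shifted, offsets, cum, prev_end); `for start, end in ec` (rows have length 2 under Pre_)
  let st := ec.foldl
    (fun acc r =>
      let start := epG0 r
      let stop := epG1 r
      let cum := acc.2.2.1 + (start - acc.2.2.2)
      (acc.1 ++ [[start - cum, stop - cum]], acc.2.1 ++ [cum], cum, stop))
    (([], [], 0, 1) : List (List Int) × List Int × Int × Int)
  (st.1, st.2.1)

-- ===== PRECONDITION & SPEC =====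
-- Pre_ excludes exactly the inputs on which the Python A raises: a row shorter than 3 entries or a
-- row whose 2nd/3rd entry is not an int() literal (ValueError/IndexError), and an empty coordinate
-- list with strand '+' or '-' (IndexError on the strand shift).
def Pre_exon_processor (exon_coords : List (List String)) (strand : String) : Prop :=
  (exon_coords.all (fun r => decide (3 ≤ r.length) &&
      (PySem.Int.ofStr? (r.getD 1 "")).isSome && (PySem.Int.ofStr? (r.getD 2 "")).isSome)) = true
  ∧ ((strand = "+" ∨ strand = "-") → exon_coords ≠ [])
instance (exon_coords : List (List String)) (strand : String) : Decidable (Pre_exon_processor exon_coords strand) := by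
  unfold Pre_exon_processor; infer_instance

def pvWitness_exon_processor : List (List String) × String :=
  ([["chr1", "100", "200"], ["chr1", "300", "600"]], "+")

def Spec_exon_processor (exon_coords : List (List String)) (strand : String) (out : List (List Int) × List Int) : Prop := out = exon_processor_alt exon_coords strand
instance (exon_coords : List (List String)) (strand : String) (out : List (List Int) × List Int) : Decidable (Spec_exon_processor exon_coords strand out) := by unfold Spec_exon_processor; infer_instance

-- ===== CLAIM (what is proved, stated in full; the proofs are below) =====
def Claim_equal_exon_processor : Prop := ∀ (exon_coords : List (List String)) (strand : String), Dom_exon_processor exon_coords strand → Pre_exon_processor exon_coords strand → Spec_exon_processor exon_coords strand (exon_processor exon_coords strand)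

-- ===== LEMMAS AND PROOFS =====

-- the offset list B produces from state (cum, prev_end), and its final cum / prev_end
def epOffs (cum pe : Int) : List (List Int) → List Int
  | [] => []
  | r :: t => (cum + (epG0 r - pe)) :: epOffs (cum + (epG0 r - pe)) (epG1 r) t

def epCum (cum pe : Int) : List (List Int) → Int
  | [] => cum
  | r :: t => epCum (cum + (epG0 r - pe)) (epG1 r) t

def epPe (pe : Int) : List (List Int) → Int
  | [] => pe
  | r :: t => epPe (epG1 r) t

lemma epOffs_length (cum pe : Int) (xs : List (List Int)) : (epOffs cum pe xs).length = xs.length := by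
  induction xs generalizing cum pe with
  | nil => rfl
  | cons r t ih => simp [epOffs, ih]

lemma epOffs_snoc (cum pe : Int) (xs : List (List Int)) (r : List Int) :
    epOffs cum pe (xs ++ [r]) = epOffs cum pe xs ++ [epCum cum pe xs + (epG0 r - epPe pe xs)] := by
  induction xs generalizing cum pe with
  | nil => rfl
  | cons a t ih => simp [epOffs, epCum, epPe, ih]

lemma epOffs_getD_len (cum pe : Int) (xs : List (List Int)) :
    PySem.List.pyGetD (cum :: epOffs cum pe xs) (xs.length : Int) 0 = epCum cum pe xs := by
  induction xs generalizing cum pe with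
  | nil => simp [epOffs, epCum]
  | cons r t ih =>
    simp only [epOffs, epCum, List.length_cons, Nat.cast_add, Nat.cast_one]
    rw [show ((t.length : Int) + 1) = (((t.length + 1 : Nat)) : Int) from by push_cast; ring,
      PySem.List.pyGetD_natCast, List.getD_cons_succ, ← PySem.List.pyGetD_natCast]
    exact ih _ _

lemma epPe_getD (cs : List (List Int)) (n : Nat) (d : List Int) (hn : n ≤ cs.length) :
    epPe (epG1 d) (cs.take n) = epG1 ((d :: cs).getD n []) := by
  induction cs generalizing n d with
  | nil =>
    have : n = 0 := by simpa using hn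
    subst this; simp [epPe]
  | cons r t ih =>
    cases n with
    | zero => simp [epPe]
    | succ m => simpa [epPe] using ih m r (by simpa using Nat.succ_le_succ_iff.mp hn)

lemma epAfold (cs : List (List Int)) (n : Nat) (hn : n ≤ cs.length) :
    (PySem.List.pyRange 1 ((n : Int) + 1) 1).foldl
      (fun offs i => offs ++ [PySem.List.pyGetD offs (i - 1) 0 +
          (epG0 (PySem.List.pyGetD ([1, 1] :: cs) i []) - epG1 (PySem.List.pyGetD ([1, 1] :: cs) (i - 1) []))]) [0]
    = 0 :: epOffs 0 1 (cs.take n) := by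
  induction n with
  | zero => simp [PySem.List.pyRange_one_eq_nil, epOffs]
  | succ m ih =>
    have hm : m ≤ cs.length := by omega
    have hmlt : m < cs.length := by omega
    have hlen : (cs.take m).length = m := by simp [hm]
    rw [show (((m + 1 : Nat)) : Int) + 1 = ((m : Int) + 1) + 1 from by push_cast; ring,
      PySem.List.pyRange_one_succ_right (by omega : (1 : Int) ≤ (m : Int) + 1),
      List.foldl_append, ih hm]
    simp only [List.foldl_cons, List.foldl_nil]
    have hofs : PySem.List.pyGetD (0 :: epOffs 0 1 (cs.take m)) ((m : Int)) 0 = epCum 0 1 (cs.take m) := by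
      have h := epOffs_getD_len 0 1 (cs.take m); rwa [hlen] at h
    have h2 : PySem.List.pyGetD ([1, 1] :: cs) ((m : Int) + 1) ([] : List Int) = cs[m] := by
      rw [show ((m : Int) + 1) = (((m + 1 : Nat)) : Int) from by push_cast; ring,
        PySem.List.pyGetD_natCast, List.getD_cons_succ]
      simp [List.getD_eq_getElem?_getD, List.getElem?_eq_getElem hmlt]
    have hpe : epG1 (PySem.List.pyGetD ([1, 1] :: cs) ((m : Int)) ([] : List Int)) = epPe 1 (cs.take m) := by
      rw [PySem.List.pyGetD_natCast]
      simpa [show epG1 [1, 1] = 1 from by decide] using (epPe_getD cs m [1, 1] hm).symm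
    rw [show ((m : Int) + 1) - 1 = ((m : Int)) from by ring, hofs, h2, hpe]
    have htake : cs.take (m + 1) = cs.take m ++ [cs[m]] := by
      rw [List.take_add_one]; simp [List.getElem?_eq_getElem hmlt]
    rw [htake, epOffs_snoc, List.cons_append]

lemma epBfold (cs : List (List Int)) (sh : List (List Int)) (offs : List Int) (cum pe : Int) :
    cs.foldl
      (fun acc r =>
        let start := epG0 r
        let stop := epG1 r
        let c := acc.2.2.1 + (start - acc.2.2.2)
        (acc.1 ++ [[start - c, stop - c]], acc.2.1 ++ [c], c, stop))
      ((sh, offs, cum, pe) : List (List Int) × List Int × Int × Int)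
    = (sh ++ List.zipWith (fun r c => [epG0 r - c, epG1 r - c]) cs (epOffs cum pe cs),
       offs ++ epOffs cum pe cs, epCum cum pe cs, epPe pe cs) := by
  induction cs generalizing sh offs cum pe with
  | nil => simp [epOffs, epCum, epPe]
  | cons r t ih => simp [epOffs, epCum, epPe, ih]

lemma epShift_map (cs : List (List Int)) (offs : List Int) (hl : offs.length = cs.length) :
    (PySem.List.enumerate cs 0).map (fun x =>
        [epG0 x.2 - PySem.List.pyGetD offs x.1 0, epG1 x.2 - PySem.List.pyGetD offs x.1 0])
    = List.zipWith (fun r c => [epG0 r - c, epG1 r - c]) cs offs := by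
  apply List.ext_getElem
  · simp [PySem.List.length_enumerate, hl]
  · intro k h1 h2
    have hk : k < cs.length := by simpa [PySem.List.length_enumerate] using h1
    have hko : k < offs.length := by omega
    simp [PySem.List.getElem_enumerate, PySem.List.pyGetD_natCast, List.getD_eq_getElem?_getD,
      List.getElem?_eq_getElem hko]

-- ===== VERDICT (by name: the statement is the Claim_ definition above) =====
theorem exon_processor_spec : Claim_equal_exon_processor := by
  intro exon_coords strand _ _
  simp only [Spec_exon_processor, exon_processor, exon_processor_alt]
  generalize epPrep exon_coords strand = cs
  simp only [PySem.List.insert_zero, List.length_cons, Nat.cast_add, Nat.cast_one, List.tail_cons]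
  rw [epAfold cs cs.length le_rfl, List.take_length, epBfold]
  simp only [List.tail_cons, List.nil_append]
  rw [epShift_map cs (epOffs 0 1 cs) (by simp [epOffs_length])]
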